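-- pv_equiv track=rewrite | github.com/hilmklnc/bindFx | biocoder.py | seqtoi
-- ===== SOURCE A (Python) =====
-- nucleotides = {'A':0,'C':1,'G':2,'T':3}
--
-- def seqtoi(seq,gappos=0,gapsize=0):
--     # due to various seqlengths, this project always needs append 1 to the left
--     binrep = 1
--     gaps = range(gappos,gappos+gapsize)
--     for i in range(0,len(seq)):
--         if i in gaps:
--             continue
--         binrep <<= 2
--         binrep |= nucleotides[seq[i]]
--     return binrep
-- ===== SOURCE B (Python) =====
-- nucleotides = {'A':0,'C':1,'G':2,'T':3}
--
-- def seqtoi(seq, gappos=0, gapsize=0):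
--     # Evaluate the gap-free subsequence as a base-4 numeral, built right-to-left
--     # with explicit place values (pure arithmetic, no bit operations).
--     lo = max(gappos, 0)
--     hi = max(gappos + gapsize, lo)
--     kept = seq[:lo] + seq[hi:]
--     acc, place = 0, 1
--     for c in reversed(kept):
--         acc += nucleotides[c] * place
--         place *= 4
--     return place + acc
-- ===== Notes on version B (the rewrite author's own statement) =====
-- stated objective: alternative
-- what changed: B slices the gap-free subsequence out once and evaluates it as a base-4 numeral right-to-left with explicit place values (multiply/add positional arithmetic), instead of A's left-to-right index loop with a per-index gap-membership test and bitwise shift/or accumulation.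
import Mathlib
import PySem

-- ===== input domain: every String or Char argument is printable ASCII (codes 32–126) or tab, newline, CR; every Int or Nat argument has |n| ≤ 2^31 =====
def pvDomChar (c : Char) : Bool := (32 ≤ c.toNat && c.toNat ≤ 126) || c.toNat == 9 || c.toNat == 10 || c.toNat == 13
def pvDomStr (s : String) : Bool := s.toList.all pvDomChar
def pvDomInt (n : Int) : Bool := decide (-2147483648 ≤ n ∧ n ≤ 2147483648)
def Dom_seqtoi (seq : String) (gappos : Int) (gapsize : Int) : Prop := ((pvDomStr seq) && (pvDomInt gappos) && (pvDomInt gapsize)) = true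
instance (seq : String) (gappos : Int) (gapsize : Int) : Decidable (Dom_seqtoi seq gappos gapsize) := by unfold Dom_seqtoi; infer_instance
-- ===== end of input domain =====

-- B slices the gap-free subsequence out once and evaluates it as a base-4 numeral
-- right-to-left with explicit place values (positional arithmetic), instead of A's
-- index loop with a per-index gap test and bitwise shift/or. Objective: alternative.


-- ===== PORT A =====
-- nucleotides[c]; exact under Pre_seqtoi (every processed character is one of A/C/G/T;
-- on any other character Python raises KeyError, excluded by Pre_seqtoi)
def nucVal (c : Char) : Int :=
  if c = 'A' then 0 else if c = 'C' then 1 else if c = 'G' then 2 else if c = 'T' then 3 else 0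

-- 'i in gaps' for gaps = range(gappos, gappos+gapsize) is gappos ≤ i < gappos+gapsize;
-- seq[i] is in range for every i of the loop, so pyGetD is exact here
def seqtoi (seq : String) (gappos : Int) (gapsize : Int) : Int :=
  let cs := seq.toList
  (PySem.List.pyRange 0 (cs.length : Int) 1).foldl
    (fun binrep i =>
      if gappos ≤ i ∧ i < gappos + gapsize then binrep
      else PySem.Int.bor (binrep <<< 2) (nucVal (PySem.List.pyGetD cs i ' '))) 1

-- ===== PORT B =====
def seqtoi_alt (seq : String) (gappos : Int) (gapsize : Int) : Int :=
  let cs := seq.toList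
  let lo := max gappos 0
  let hi := max (gappos + gapsize) lo
  let kept := PySem.List.slice cs none (some lo) ++ PySem.List.slice cs (some hi) none
  let r := kept.reverse.foldl
    (fun (p : Int × Int) c => (p.1 + nucVal c * p.2, p.2 * 4)) (0, 1)
  r.2 + r.1

-- ===== PRECONDITION & SPEC =====
-- Pre_ excludes exactly the inputs where Python A raises KeyError: a character outside
-- the gap range that is not one of 'A','C','G','T'.
def Pre_seqtoi (seq : String) (gappos : Int) (gapsize : Int) : Prop :=
  ∀ p ∈ PySem.List.enumerate seq.toList 0,
    (gappos ≤ p.1 ∧ p.1 < gappos + gapsize) ∨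
    (p.2 = 'A' ∨ p.2 = 'C' ∨ p.2 = 'G' ∨ p.2 = 'T')
instance (seq : String) (gappos : Int) (gapsize : Int) : Decidable (Pre_seqtoi seq gappos gapsize) := by
  unfold Pre_seqtoi; infer_instance

def pvWitness_seqtoi : String × Int × Int := ("ACGT", 1, 2)

def Spec_seqtoi (seq : String) (gappos : Int) (gapsize : Int) (out : Int) : Prop := out = seqtoi_alt seq gappos gapsize
instance (seq : String) (gappos : Int) (gapsize : Int) (out : Int) : Decidable (Spec_seqtoi seq gappos gapsize out) := by unfold Spec_seqtoi; infer_instance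

-- ===== CLAIM (what is proved, stated in full; the proofs are below) =====
def Claim_equal_seqtoi : Prop := ∀ (seq : String) (gappos : Int) (gapsize : Int), Dom_seqtoi seq gappos gapsize → Pre_seqtoi seq gappos gapsize → Spec_seqtoi seq gappos gapsize (seqtoi seq gappos gapsize)

-- ===== LEMMAS AND PROOFS =====

-- common reference form: Horner evaluation of the base-4 digits
def hornerEnc (l : List Char) (b : Int) : Int := l.foldl (fun a c => 4 * a + nucVal c) b

lemma nucVal_bounds (c : Char) : 0 ≤ nucVal c ∧ nucVal c < 4 := by
  unfold nucVal; split_ifs <;> norm_num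

lemma bor_shift (b v : Int) (hb : 0 ≤ b) (hv : 0 ≤ v) (hv4 : v < 4) :
    PySem.Int.bor (b <<< 2) v = 4 * b + v := by
  obtain ⟨m, rfl⟩ := Int.eq_ofNat_of_zero_le hb
  obtain ⟨n, rfl⟩ := Int.eq_ofNat_of_zero_le hv
  have hn : n < 4 := by exact_mod_cast hv4
  have hshift : ((m : Int) <<< 2) = ((m <<< 2 : Nat) : Int) := rfl
  rw [hshift, PySem.Int.bor_natCast]
  have : (m <<< 2) ||| n = 4 * m + n := by
    apply Nat.eq_of_testBit_eq
    intro i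
    rw [Nat.testBit_or, Nat.testBit_shiftLeft]
    rcases i with _ | _ | i
    · simp [Nat.testBit_zero]; omega
    · simp [Nat.testBit_add_one, Nat.testBit_zero]; omega
    · have h2 : (4 * m + n).testBit (i + 2) = m.testBit i := by
        simp [Nat.testBit_add_one]
        congr 1
        omega
      have h3 : n.testBit (i + 2) = false := by
        apply Nat.testBit_eq_false_of_lt
        have h1 := Nat.one_le_two_pow (n := i)
        calc n < 4 := hn
          _ = 4 * 1 := by ring
          _ ≤ 4 * 2 ^ i := by omega
          _ = 2 ^ (i + 2) := by ring
      simp [h2, h3]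
  rw [this]; push_cast; ring

-- A's shift/or fold equals Horner evaluation (for any nonnegative seed)
lemma foldl_bor_eq_horner (l : List Char) (b : Int) (hb : 0 ≤ b) :
    l.foldl (fun a c => PySem.Int.bor (a <<< 2) (nucVal c)) b = hornerEnc l b := by
  induction l generalizing b with
  | nil => rfl
  | cons c t ih =>
    obtain ⟨h0, h4⟩ := nucVal_bounds c
    simp only [List.foldl_cons, hornerEnc] at *
    rw [bor_shift b (nucVal c) hb h0 h4, ih _ (by omega)]

-- Horner with seed b splits off b·4^n
lemma horner_seed (l : List Char) (b : Int) :
    hornerEnc l b = b * 4 ^ l.length + hornerEnc l 0 := by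
  induction l generalizing b with
  | nil => simp [hornerEnc]
  | cons c t ih =>
    simp only [hornerEnc, List.foldl_cons, List.length_cons] at *
    rw [ih (4 * b + nucVal c), ih (4 * 0 + nucVal c)]
    ring

-- B's reversed place-value fold, characterised
lemma revfold_char (l : List Char) (a p : Int) :
    l.reverse.foldl (fun (q : Int × Int) c => (q.1 + nucVal c * q.2, q.2 * 4)) (a, p)
      = (a + p * hornerEnc l 0, p * 4 ^ l.length) := by
  induction l using List.reverseRecOn generalizing a p with
  | nil => simp [hornerEnc]
  | append_singleton t x ih =>
    rw [List.reverse_append]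
    simp only [List.reverse_singleton, List.singleton_append, List.foldl_cons]
    rw [ih]
    have : hornerEnc (t ++ [x]) 0 = 4 * hornerEnc t 0 + nucVal x := by
      simp [hornerEnc]
    rw [this]
    simp only [List.length_append, List.length_singleton]
    simp only [Prod.mk.injEq]
    constructor <;> ring

-- A's index loop with skip predicate equals a fold of the same step over the
-- clamped-slice subsequence B builds (true for ANY characters; Pre_ is needed only
-- so that the Python sides return at all).
lemma seqtoi_loop_eq_kept (gappos gapsize : Int) (cs : List Char) :
    (PySem.List.pyRange 0 (cs.length : Int) 1).foldl
      (fun binrep i =>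
        if gappos ≤ i ∧ i < gappos + gapsize then binrep
        else PySem.Int.bor (binrep <<< 2) (nucVal (PySem.List.pyGetD cs i ' '))) 1
    = (cs.take (max gappos 0).toNat ++ cs.drop (max (gappos + gapsize) (max gappos 0)).toNat).foldl
        (fun binrep c => PySem.Int.bor (binrep <<< 2) (nucVal c)) 1 := by
  induction cs using List.reverseRecOn with
  | nil => simp [PySem.List.pyRange_one_eq_nil]
  | append_singleton xs x ih =>
    have hn : (0 : Int) ≤ (xs.length : Int) := by positivity
    have hlen : ((xs ++ [x]).length : Int) = (xs.length : Int) + 1 := by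
      simp
    rw [hlen, PySem.List.pyRange_one_succ_right hn, List.foldl_append]
    simp only [List.foldl_cons, List.foldl_nil]
    have hcongr :
        (PySem.List.pyRange 0 (xs.length : Int) 1).foldl
          (fun binrep i =>
            if gappos ≤ i ∧ i < gappos + gapsize then binrep
            else PySem.Int.bor (binrep <<< 2) (nucVal (PySem.List.pyGetD (xs ++ [x]) i ' '))) 1
        = (PySem.List.pyRange 0 (xs.length : Int) 1).foldl
          (fun binrep i =>
            if gappos ≤ i ∧ i < gappos + gapsize then binrep
            else PySem.Int.bor (binrep <<< 2) (nucVal (PySem.List.pyGetD xs i ' '))) 1 := by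
      apply PySem.List.foldl_congr_mem
      intro b i hi
      have hmem : (0 : Int) ≤ i ∧ i < (xs.length : Int) :=
        (PySem.List.mem_pyRange_one).mp hi
      rw [PySem.List.pyGetD_eq_getElem (xs ++ [x]) ' ' hmem.1 (by simp only [List.length_append, List.length_cons, List.length_nil]; omega),
          PySem.List.pyGetD_eq_getElem xs ' ' hmem.1 (by exact_mod_cast hmem.2),
          List.getElem_append_left (by omega)]
    rw [hcongr, ih]
    have hL : ((max gappos 0).toNat : Int) = max gappos 0 := Int.toNat_of_nonneg (by omega)
    have hH : ((max (gappos + gapsize) (max gappos 0)).toNat : Int)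
        = max (gappos + gapsize) (max gappos 0) := Int.toNat_of_nonneg (by omega)
    set L := (max gappos 0).toNat with hLdef
    set H := (max (gappos + gapsize) (max gappos 0)).toNat with hHdef
    have hLH : L ≤ H := by omega
    have hget : PySem.List.pyGetD (xs ++ [x]) (xs.length : Int) ' ' = x := by
      rw [PySem.List.pyGetD_eq_getElem (xs ++ [x]) ' ' hn (by simp)]
      simp
    by_cases h1 : xs.length < L
    · have hskip : ¬ (gappos ≤ (xs.length : Int) ∧ (xs.length : Int) < gappos + gapsize) := by
        omega
      rw [if_neg hskip, hget]
      rw [List.take_of_length_le (l := xs ++ [x]) (by simp only [List.length_append, List.length_cons, List.length_nil]; omega),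
          List.drop_eq_nil_of_le (as := xs ++ [x]) (by simp only [List.length_append, List.length_cons, List.length_nil]; omega),
          List.take_of_length_le (l := xs) (by omega), List.drop_eq_nil_of_le (as := xs) (by omega)]
      simp
    · by_cases h2 : xs.length < H
      · have hskip : gappos ≤ (xs.length : Int) ∧ (xs.length : Int) < gappos + gapsize := by
          omega
        rw [if_pos hskip]
        rw [List.take_append_of_le_length (by omega),
            List.drop_eq_nil_of_le (as := xs ++ [x]) (by simp only [List.length_append, List.length_cons, List.length_nil]; omega),
            List.drop_eq_nil_of_le (as := xs) (by omega)]
      · have hskip : ¬ (gappos ≤ (xs.length : Int) ∧ (xs.length : Int) < gappos + gapsize) := by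
          omega
        rw [if_neg hskip, hget]
        rw [List.take_append_of_le_length (by omega), List.drop_append_of_le_length (by omega)]
        rw [← List.append_assoc, List.foldl_append]
        simp

-- ===== VERDICT (by name: the statement is the Claim_ definition above) =====
theorem seqtoi_spec : Claim_equal_seqtoi := by
  intro seq gappos gapsize _ _
  unfold Spec_seqtoi
  simp only [seqtoi, seqtoi_alt]
  rw [PySem.List.slice_to seq.toList (le_max_right _ _),
      PySem.List.slice_from seq.toList (by omega)]
  rw [seqtoi_loop_eq_kept gappos gapsize seq.toList]
  rw [foldl_bor_eq_horner _ 1 (by norm_num), revfold_char]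
  rw [horner_seed]
  ring
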